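-- pv_equiv track=rewrite | github.com/aivaslab/standoff | src/curriculum_configs.py | extract_regime_and_base
-- ===== SOURCE A (Python) =====
-- def extract_regime_and_base(name):
--     regime = 's1'
--     base = name
--     for r in ['s21', 's3', 's2', 's1', 's22']:
--         if name.endswith('_' + r):
--             regime = r
--             base = name[:-len('_' + r)]
--             break
--     return regime, base
-- ===== SOURCE B (Python) =====
-- def extract_regime_and_base(name):
--     base, sep, tok = name.rpartition('_')
--     if sep and tok in {'s21', 's3', 's2', 's1', 's22'}:
--         return tok, base
--     return 's1', name
-- ===== Notes on version B (the rewrite author's own statement) =====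
-- stated objective: simpler
-- what changed: B replaces A's loop of five endswith tests and per-candidate slicing with a single rpartition at the last underscore plus one set-membership test on the trailing token.
import Mathlib
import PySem

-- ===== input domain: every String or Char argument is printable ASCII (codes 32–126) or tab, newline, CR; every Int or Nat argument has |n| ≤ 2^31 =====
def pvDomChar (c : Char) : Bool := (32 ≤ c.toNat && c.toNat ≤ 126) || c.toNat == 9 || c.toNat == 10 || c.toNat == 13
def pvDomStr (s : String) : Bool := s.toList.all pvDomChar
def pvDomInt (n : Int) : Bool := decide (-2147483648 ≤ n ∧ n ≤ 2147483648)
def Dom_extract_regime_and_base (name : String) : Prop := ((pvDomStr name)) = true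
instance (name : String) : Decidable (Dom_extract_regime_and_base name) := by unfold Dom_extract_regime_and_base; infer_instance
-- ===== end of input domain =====

-- B parses the name once (rpartition at the last underscore) and tests the trailing token against a
-- set, instead of A's loop of five endswith tests with per-candidate slicing — simpler, one scan.


-- ===== PORT A =====
-- the 'for r in [...]' loop with break, carried as structural recursion; falling off the
-- loop returns the initial regime='s1', base=name
def pvLoopA : List String → String → String × String
  | [], name => ("s1", name)
  | r :: rs, name =>
    if PySem.Str.endswith name ("_" ++ r) then
      (r, PySem.Str.slice name none (some (-(PySem.Str.len ("_" ++ r)))))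
    else pvLoopA rs name

def extract_regime_and_base (name : String) : String × String :=
  pvLoopA ["s21", "s3", "s2", "s1", "s22"] name

-- ===== PORT B =====
-- hand port of str.rpartition for the one-character separator '_' (exact for a single-char
-- separator): scan the reversed characters for the first '_'; none = separator absent.
def pvRPartUnd : List Char → List Char → Option (List Char × List Char)
  | [], _ => none
  | c :: rest, acc => if c = '_' then some (rest.reverse, acc) else pvRPartUnd rest (c :: acc)

def extract_regime_and_base_alt (name : String) : String × String :=
  match pvRPartUnd name.toList.reverse [] with
  | some (base, tok) =>
    if PySem.Set.contains (PySem.Set.ofList ["s21", "s3", "s2", "s1", "s22"]) (String.ofList tok) then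
      (String.ofList tok, String.ofList base)
    else ("s1", name)
  | none => ("s1", name)

-- ===== PRECONDITION & SPEC =====
def Spec_extract_regime_and_base (name : String) (out : String × String) : Prop := out = extract_regime_and_base_alt name
instance (name : String) (out : String × String) : Decidable (Spec_extract_regime_and_base name out) := by unfold Spec_extract_regime_and_base; infer_instance

-- ===== CLAIM (what is proved, stated in full; the proofs are below) =====
def Claim_equal_extract_regime_and_base : Prop := ∀ (name : String), Dom_extract_regime_and_base name → Spec_extract_regime_and_base name (extract_regime_and_base name)

-- ===== LEMMAS AND PROOFS =====

-- pvRPartUnd on a list of the form pre ++ '_' :: post with no '_' in pre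
theorem pvRPartUnd_split (pre : List Char) (hpre : '_' ∉ pre) :
    ∀ (post acc : List Char),
      pvRPartUnd (pre ++ '_' :: post) acc = some (post.reverse, pre.reverse ++ acc) := by
  induction pre with
  | nil => intro post acc; simp [pvRPartUnd]
  | cons c cs ih =>
    intro post acc
    have hc : c ≠ '_' := by intro h; exact hpre (by simp [h])
    have hcs : '_' ∉ cs := fun h => hpre (by simp [h])
    simp [pvRPartUnd, hc, ih hcs post]

-- what a successful pvRPartUnd tells us about its input
theorem pvRPartUnd_some (m : List Char) :
    ∀ (acc b t : List Char), pvRPartUnd m acc = some (b, t) →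
      ∃ pre post, m = pre ++ '_' :: post ∧ '_' ∉ pre ∧ t = pre.reverse ++ acc ∧ b = post.reverse := by
  induction m with
  | nil => intro acc b t h; simp [pvRPartUnd] at h
  | cons c cs ih =>
    intro acc b t h
    by_cases hc : c = '_'
    · subst hc
      simp [pvRPartUnd] at h
      exact ⟨[], cs, by simp, by simp, by simp [h.2], by simp [h.1]⟩
    · simp [pvRPartUnd, hc] at h
      obtain ⟨pre, post, hm, hpre, ht, hb⟩ := ih (c :: acc) b t h
      refine ⟨c :: pre, post, by simp [hm], ?_, by simp [ht], hb⟩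
      intro hmem
      rcases List.mem_cons.mp hmem with h' | h'
      · exact hc h'.symm
      · exact hpre h'

-- B's value when the name splits as u ++ '_' ++ r with no '_' in r
theorem alt_of_split (name : String) (u r : List Char) (hname : name.toList = u ++ '_' :: r)
    (hr : '_' ∉ r) :
    extract_regime_and_base_alt name =
      if PySem.Set.contains (PySem.Set.ofList ["s21", "s3", "s2", "s1", "s22"]) (String.ofList r) then
        (String.ofList r, String.ofList u)
      else ("s1", name) := by
  have hrev : name.toList.reverse = r.reverse ++ '_' :: u.reverse := by
    simp [hname]
  have hr' : '_' ∉ r.reverse := by simpa using hr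
  unfold extract_regime_and_base_alt
  rw [hrev, pvRPartUnd_split r.reverse hr' u.reverse []]
  simp

-- endswith as a suffix fact on the character lists
theorem endswith_iff_suffix (name p : String) :
    PySem.Str.endswith name p = true ↔ p.toList <:+ name.toList := by
  rw [PySem.Str.endswith_eq, PySem.Chars.endswith_iff]

-- membership in the candidate set, spelled out
theorem contains_iff (t : String) :
    PySem.Set.contains (PySem.Set.ofList ["s21", "s3", "s2", "s1", "s22"]) t = true ↔
      (t = "s21" ∨ t = "s3" ∨ t = "s2" ∨ t = "s1" ∨ t = "s22") := by
  simp [PySem.Set.contains, PySem.Set.ofList, PySem.Set.add]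

-- A's sliced base: name[:-k] when name's character list is u followed by k characters
theorem slice_of_suffix (name : String) (u sfx : List Char) (h : name.toList = u ++ sfx)
    (k : Nat) (hk : sfx.length = k) (hkpos : 0 < k) :
    (PySem.Str.slice name none (some (-(k : Int)))).toList = u := by
  rw [PySem.Str.toList_slice]
  simp only [PySem.Chars.slice_eq_listSlice]
  rw [PySem.List.slice_to_neg_natCast _ k hkpos, h]
  simp [hk]

-- positive case: name ends with '_' ++ r and r is one of the candidates
theorem pos_case (name r : String) (hr : '_' ∉ r.toList)
    (hmem : PySem.Set.contains (PySem.Set.ofList ["s21", "s3", "s2", "s1", "s22"]) r = true)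
    (h : PySem.Str.endswith name ("_" ++ r) = true) :
    (r, PySem.Str.slice name none (some (-(PySem.Str.len ("_" ++ r))))) =
      extract_regime_and_base_alt name := by
  rw [endswith_iff_suffix] at h
  obtain ⟨u, hu⟩ := h
  have hname : name.toList = u ++ '_' :: r.toList := by rw [← hu]; simp
  rw [alt_of_split name u r.toList hname hr]
  have hmk : String.ofList r.toList = r := String.toList_inj.mp (by simp)
  rw [hmk, if_pos hmem]
  have hlen : PySem.Str.len ("_" ++ r) = ((r.toList.length + 1 : Nat) : Int) := by
    rw [PySem.Str.len_eq]
    simp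
  refine Prod.ext rfl (String.toList_inj.mp ?_)
  rw [hlen, slice_of_suffix name u ('_' :: r.toList) hname (r.toList.length + 1) (by simp) (by omega)]
  simp

-- a successful candidate token would mean one of the endswith tests had fired
theorem not_end (name r : String) (pre post : List Char)
    (hname : name.toList = post.reverse ++ '_' :: pre.reverse)
    (hpr : pre.reverse = r.toList)
    (hneg : ¬ PySem.Str.endswith name ("_" ++ r) = true) : False := by
  apply hneg
  rw [endswith_iff_suffix]
  refine ⟨post.reverse, ?_⟩
  rw [hname, hpr]
  simp

-- negative case: none of the five endswith tests fires
theorem neg_case (name : String)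
    (h1 : ¬ PySem.Str.endswith name ("_" ++ "s21") = true)
    (h2 : ¬ PySem.Str.endswith name ("_" ++ "s3") = true)
    (h3 : ¬ PySem.Str.endswith name ("_" ++ "s2") = true)
    (h4 : ¬ PySem.Str.endswith name ("_" ++ "s1") = true)
    (h5 : ¬ PySem.Str.endswith name ("_" ++ "s22") = true) :
    ("s1", name) = extract_regime_and_base_alt name := by
  unfold extract_regime_and_base_alt
  cases hsplit : pvRPartUnd name.toList.reverse [] with
  | none => rfl
  | some p =>
    obtain ⟨b, t⟩ := p
    obtain ⟨pre, post, hm, hpre, ht, hb⟩ := pvRPartUnd_some _ _ _ _ hsplit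
    have ht' : t = pre.reverse := by simpa using ht
    have hname : name.toList = post.reverse ++ '_' :: pre.reverse := by
      have := congrArg List.reverse hm
      simpa using this
    by_cases hc : PySem.Set.contains (PySem.Set.ofList ["s21", "s3", "s2", "s1", "s22"]) (String.ofList t) = true
    · exfalso
      rw [contains_iff] at hc
      rcases hc with h | h | h | h | h
      · refine not_end name "s21" pre post hname ?_ h1
        rw [← ht', ← h]
        simp
      · refine not_end name "s3" pre post hname ?_ h2
        rw [← ht', ← h]
        simp
      · refine not_end name "s2" pre post hname ?_ h3
        rw [← ht', ← h]
        simp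
      · refine not_end name "s1" pre post hname ?_ h4
        rw [← ht', ← h]
        simp
      · refine not_end name "s22" pre post hname ?_ h5
        rw [← ht', ← h]
        simp
    · show ("s1", name) =
        if PySem.Set.contains (PySem.Set.ofList ["s21", "s3", "s2", "s1", "s22"]) (String.ofList t) = true then
          (String.ofList t, String.ofList b)
        else ("s1", name)
      rw [if_neg hc]

theorem main_eq (name : String) :
    extract_regime_and_base name = extract_regime_and_base_alt name := by
  simp only [extract_regime_and_base, pvLoopA]
  by_cases h1 : PySem.Str.endswith name ("_" ++ "s21") = true
  · rw [if_pos h1]; exact pos_case name "s21" (by decide) (by decide) h1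
  · rw [if_neg h1]
    by_cases h2 : PySem.Str.endswith name ("_" ++ "s3") = true
    · rw [if_pos h2]; exact pos_case name "s3" (by decide) (by decide) h2
    · rw [if_neg h2]
      by_cases h3 : PySem.Str.endswith name ("_" ++ "s2") = true
      · rw [if_pos h3]; exact pos_case name "s2" (by decide) (by decide) h3
      · rw [if_neg h3]
        by_cases h4 : PySem.Str.endswith name ("_" ++ "s1") = true
        · rw [if_pos h4]; exact pos_case name "s1" (by decide) (by decide) h4
        · rw [if_neg h4]
          by_cases h5 : PySem.Str.endswith name ("_" ++ "s22") = true
          · rw [if_pos h5]; exact pos_case name "s22" (by decide) (by decide) h5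
          · rw [if_neg h5]; exact neg_case name h1 h2 h3 h4 h5

-- ===== VERDICT (by name: the statement is the Claim_ definition above) =====
theorem extract_regime_and_base_spec : Claim_equal_extract_regime_and_base := by
  intro name _
  unfold Spec_extract_regime_and_base
  exact main_eq name
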